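-- pv_equiv track=rewrite | github.com/gabeochoa/floatinghotel | scripts/dashboard_data.py | get_task_stats
-- ===== SOURCE A (Python) =====
-- from typing import Any
--
-- def get_task_stats(tasks: list[dict[str, Any]]) -> dict[str, int]:
--     """Compute aggregate status counts from a tasks list.
--
--     Returns a dict with keys: total, completed, in_progress, open, pending,
--     blocked, failed.
--     """
--     stats: dict[str, int] = {
--         "total": len(tasks),
--         "completed": 0,
--         "in_progress": 0,
--         "open": 0,
--         "pending": 0,
--         "blocked": 0,
--         "failed": 0,
--     }
--     for task in tasks:
--         status = task.get("status", "open")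
--         if status in stats:
--             stats[status] += 1
--     return stats
-- ===== SOURCE B (Python) =====
-- def get_task_stats(tasks: list[dict[str, "Any"]]) -> dict[str, int]:
--     """Compute aggregate status counts from a tasks list (frequency-table version)."""
--     counts: dict[str, int] = {}
--     for task in tasks:
--         s = task.get("status", "open")
--         counts[s] = counts.get(s, 0) + 1
--     stats = {
--         "total": len(tasks),
--         "completed": 0,
--         "in_progress": 0,
--         "open": 0,
--         "pending": 0,
--         "blocked": 0,
--         "failed": 0,
--     }
--     return {key: value + counts.get(key, 0) for key, value in stats.items()}
-- ===== Notes on version B (the rewrite author's own statement) =====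
-- stated objective: alternative
-- what changed: Replaced A's single pass that conditionally mutates the 7-key stats dict per task with a two-phase decomposition: first build a frequency table of statuses, then produce the result in one fixed-key pass adding counts.get(key, 0) over the stats keys (which preserves the self-counting 'total' key and the 'open' default).
import Mathlib
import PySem

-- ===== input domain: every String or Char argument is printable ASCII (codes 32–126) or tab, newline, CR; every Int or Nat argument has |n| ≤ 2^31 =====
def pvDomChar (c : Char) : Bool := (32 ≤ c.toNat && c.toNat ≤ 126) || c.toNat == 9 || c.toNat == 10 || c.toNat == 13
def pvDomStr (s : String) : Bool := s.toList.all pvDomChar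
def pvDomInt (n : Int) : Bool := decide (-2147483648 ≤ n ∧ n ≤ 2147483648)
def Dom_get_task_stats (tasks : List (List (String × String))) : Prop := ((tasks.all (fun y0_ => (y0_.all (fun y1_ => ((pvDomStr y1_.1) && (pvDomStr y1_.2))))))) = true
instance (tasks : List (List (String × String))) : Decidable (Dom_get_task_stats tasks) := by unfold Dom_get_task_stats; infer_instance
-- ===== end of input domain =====

-- B replaces A's branch-laden mutating pass with a frequency table plus a fixed-key pass (objective: alternative decomposition; same cost).

-- ===== PORT A =====
def get_task_stats (tasks : List (List (String × String))) : List (String × Int) :=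
  let stats0 : PySem.Dict String Int :=
    (((((((PySem.Dict.empty.insert "total" (tasks.length : Int)).insert "completed" 0).insert
      "in_progress" 0).insert "open" 0).insert "pending" 0).insert "blocked" 0).insert "failed" 0)
  let stats := tasks.foldl (fun stats task =>
    let status := (PySem.Dict.mk task).getD "status" "open"
    if stats.contains status then stats.modify status 0 (· + 1) else stats) stats0
  stats.items

-- ===== PORT B =====
def get_task_stats_alt (tasks : List (List (String × String))) : List (String × Int) :=
  let counts := tasks.foldl (fun d task =>
    let s := (PySem.Dict.mk task).getD "status" "open"
    d.insert s (d.getD s 0 + 1)) PySem.Dict.empty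
  let stats : List (String × Int) :=
    [("total", (tasks.length : Int)), ("completed", 0), ("in_progress", 0),
     ("open", 0), ("pending", 0), ("blocked", 0), ("failed", 0)]
  stats.map (fun kv => (kv.1, kv.2 + counts.getD kv.1 0))

-- ===== PRECONDITION & SPEC =====
def Spec_get_task_stats (tasks : List (List (String × String))) (out : List (String × Int)) : Prop := out = get_task_stats_alt tasks
instance (tasks : List (List (String × String))) (out : List (String × Int)) : Decidable (Spec_get_task_stats tasks out) := by unfold Spec_get_task_stats; infer_instance

-- ===== CLAIM (what is proved, stated in full; the proofs are below) =====
def Claim_equal_get_task_stats : Prop := ∀ (tasks : List (List (String × String))), Dom_get_task_stats tasks → Spec_get_task_stats tasks (get_task_stats tasks)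

-- ===== LEMMAS AND PROOFS =====

/-- the 7-key stats dict with explicit values -/
def pvStats7 (a b c d e f g : Int) : PySem.Dict String Int :=
  PySem.Dict.mk [("total", a), ("completed", b), ("in_progress", c),
    ("open", d), ("pending", e), ("blocked", f), ("failed", g)]

def pvStatus (task : List (String × String)) : String :=
  (PySem.Dict.mk task).getD "status" "open"

lemma pvFoldlMap {α β γ : Type} (g : β → γ) (f : α → γ → α) (l : List β) (init : α) :
    l.foldl (fun a x => f a (g x)) init = (l.map g).foldl f init := by
  induction l generalizing init with
  | nil => rfl
  | cons x xs ih => simp [List.foldl_cons, ih]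

lemma pvFoldA (sts : List String) (a b c d e f g : Int) :
    sts.foldl (fun st s => if st.contains s then st.modify s 0 (· + 1) else st) (pvStats7 a b c d e f g)
    = pvStats7 (a + sts.count "total") (b + sts.count "completed") (c + sts.count "in_progress")
        (d + sts.count "open") (e + sts.count "pending") (f + sts.count "blocked") (g + sts.count "failed") := by
  induction sts generalizing a b c d e f g with
  | nil => simp [pvStats7]
  | cons s rest ih =>
    simp only [List.foldl_cons, List.count_cons]
    by_cases h1 : s = "total"
    · subst h1
      rw [show (if (pvStats7 a b c d e f g).contains "total" then (pvStats7 a b c d e f g).modify "total" 0 (· + 1) else pvStats7 a b c d e f g) = pvStats7 (a+1) b c d e f g by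
        simp [pvStats7, PySem.Dict.contains, PySem.Dict.modify, PySem.Dict.insert, PySem.Dict.getD, PySem.Dict.get?]]
      rw [ih]; simp [pvStats7]; omega
    · by_cases h2 : s = "completed"
      · subst h2
        rw [show (if (pvStats7 a b c d e f g).contains "completed" then (pvStats7 a b c d e f g).modify "completed" 0 (· + 1) else pvStats7 a b c d e f g) = pvStats7 a (b+1) c d e f g by
          simp [pvStats7, PySem.Dict.contains, PySem.Dict.modify, PySem.Dict.insert, PySem.Dict.getD, PySem.Dict.get?]]
        rw [ih]; simp [pvStats7]; omega
      · by_cases h3 : s = "in_progress"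
        · subst h3
          rw [show (if (pvStats7 a b c d e f g).contains "in_progress" then (pvStats7 a b c d e f g).modify "in_progress" 0 (· + 1) else pvStats7 a b c d e f g) = pvStats7 a b (c+1) d e f g by
            simp [pvStats7, PySem.Dict.contains, PySem.Dict.modify, PySem.Dict.insert, PySem.Dict.getD, PySem.Dict.get?]]
          rw [ih]; simp [pvStats7]; omega
        · by_cases h4 : s = "open"
          · subst h4
            rw [show (if (pvStats7 a b c d e f g).contains "open" then (pvStats7 a b c d e f g).modify "open" 0 (· + 1) else pvStats7 a b c d e f g) = pvStats7 a b c (d+1) e f g by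
              simp [pvStats7, PySem.Dict.contains, PySem.Dict.modify, PySem.Dict.insert, PySem.Dict.getD, PySem.Dict.get?]]
            rw [ih]; simp [pvStats7]; omega
          · by_cases h5 : s = "pending"
            · subst h5
              rw [show (if (pvStats7 a b c d e f g).contains "pending" then (pvStats7 a b c d e f g).modify "pending" 0 (· + 1) else pvStats7 a b c d e f g) = pvStats7 a b c d (e+1) f g by
                simp [pvStats7, PySem.Dict.contains, PySem.Dict.modify, PySem.Dict.insert, PySem.Dict.getD, PySem.Dict.get?]]
              rw [ih]; simp [pvStats7]; omega
            · by_cases h6 : s = "blocked"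
              · subst h6
                rw [show (if (pvStats7 a b c d e f g).contains "blocked" then (pvStats7 a b c d e f g).modify "blocked" 0 (· + 1) else pvStats7 a b c d e f g) = pvStats7 a b c d e (f+1) g by
                  simp [pvStats7, PySem.Dict.contains, PySem.Dict.modify, PySem.Dict.insert, PySem.Dict.getD, PySem.Dict.get?]]
                rw [ih]; simp [pvStats7]; omega
              · by_cases h7 : s = "failed"
                · subst h7
                  rw [show (if (pvStats7 a b c d e f g).contains "failed" then (pvStats7 a b c d e f g).modify "failed" 0 (· + 1) else pvStats7 a b c d e f g) = pvStats7 a b c d e f (g+1) by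
                    simp [pvStats7, PySem.Dict.contains, PySem.Dict.modify, PySem.Dict.insert, PySem.Dict.getD, PySem.Dict.get?]]
                  rw [ih]; simp [pvStats7]; omega
                · rw [show (if (pvStats7 a b c d e f g).contains s then (pvStats7 a b c d e f g).modify s 0 (· + 1) else pvStats7 a b c d e f g) = pvStats7 a b c d e f g by
                    simp [pvStats7, PySem.Dict.contains, h1, h2, h3, h4, h5, h6, h7, Ne.symm]]
                  rw [ih]
                  simp [h1, h2, h3, h4, h5, h6, h7]

lemma pvCountsB' (tasks : List (List (String × String))) (d : PySem.Dict String Int) (k : String) :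
    (tasks.foldl (fun d task => d.insert (pvStatus task) (d.getD (pvStatus task) 0 + 1)) d).getD k 0
    = d.getD k 0 + ((tasks.map pvStatus).count k : Int) := by
  induction tasks generalizing d with
  | nil => simp
  | cons t ts ih =>
    simp only [List.foldl_cons, List.map_cons, List.count_cons, ih]
    rw [PySem.Dict.getD_insert]
    by_cases h : k = pvStatus t
    · simp [h]; omega
    · simp [h, Ne.symm h]

lemma pvCountsB (tasks : List (List (String × String))) (k : String) :
    (tasks.foldl (fun d task => d.insert (pvStatus task) (d.getD (pvStatus task) 0 + 1)) PySem.Dict.empty).getD k 0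
    = ((tasks.map pvStatus).count k : Int) := by
  rw [pvCountsB']; simp

-- ===== VERDICT (by name: the statement is the Claim_ definition above) =====
theorem get_task_stats_spec : Claim_equal_get_task_stats := by
  intro tasks _
  unfold Spec_get_task_stats get_task_stats get_task_stats_alt
  simp only []
  have h0 : (((((((PySem.Dict.empty.insert "total" (tasks.length : Int)).insert "completed" 0).insert
      "in_progress" 0).insert "open" 0).insert "pending" 0).insert "blocked" 0).insert "failed" 0)
      = pvStats7 (tasks.length : Int) 0 0 0 0 0 0 := by
    simp [pvStats7, PySem.Dict.insert, PySem.Dict.empty, PySem.Dict.contains]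
  rw [h0]
  rw [show (fun (stats : PySem.Dict String Int) (task : List (String × String)) =>
        if stats.contains ((PySem.Dict.mk task).getD "status" "open")
        then stats.modify ((PySem.Dict.mk task).getD "status" "open") 0 (· + 1) else stats)
      = fun stats task => if stats.contains (pvStatus task) then stats.modify (pvStatus task) 0 (· + 1) else stats from rfl]
  rw [show (fun (d : PySem.Dict String Int) (task : List (String × String)) =>
        d.insert ((PySem.Dict.mk task).getD "status" "open") (d.getD ((PySem.Dict.mk task).getD "status" "open") 0 + 1))
      = fun d task => d.insert (pvStatus task) (d.getD (pvStatus task) 0 + 1) from rfl]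
  rw [pvFoldlMap pvStatus
      (fun (st : PySem.Dict String Int) s => if st.contains s then st.modify s 0 (· + 1) else st) tasks
      (pvStats7 (tasks.length : Int) 0 0 0 0 0 0)]
  rw [pvFoldA]
  simp only [List.map_cons, List.map_nil]
  simp only [pvCountsB]
  simp [pvStats7]
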